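-- pv_equiv track=rewrite | github.com/alexjuliansmith/artificial-intelligence | Projects/2_Classical Planning/my_planning_graph.py | list_items
-- ===== SOURCE A (Python) =====
-- def list_items(items, item_list):
--     index = 0
--     result = set()
--     while items:
--         if items & 1:
--             result.add(item_list[index])
--         items >>= 1
--         index += 1
--     return result
-- ===== SOURCE B (Python) =====
-- def list_items(items, item_list):
--     # Kernighan bit-trick: visit only the SET bits of the mask, lowest first.
--     # Each step isolates the lowest set bit (items & -items), turns it into its
--     # index via bit_length, and clears it (items &= items - 1), so the loop runs
--     # popcount(items) times instead of once per bit position as in A.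
--     result = set()
--     while items:
--         low = items & -items
--         result.add(item_list[low.bit_length() - 1])
--         items &= items - 1
--     return result
-- ===== Notes on version B (the rewrite author's own statement) =====
-- stated objective: alternative
-- what changed: Replaced A's per-bit shift-and-test loop (one iteration for every bit position of the mask, with an index counter) by Kernighan's set-bit enumeration: each iteration isolates the lowest set bit with items & -items, maps it to its index with bit_length, and clears it with items &= items - 1, so the loop runs once per SET bit only.
import Mathlib
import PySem

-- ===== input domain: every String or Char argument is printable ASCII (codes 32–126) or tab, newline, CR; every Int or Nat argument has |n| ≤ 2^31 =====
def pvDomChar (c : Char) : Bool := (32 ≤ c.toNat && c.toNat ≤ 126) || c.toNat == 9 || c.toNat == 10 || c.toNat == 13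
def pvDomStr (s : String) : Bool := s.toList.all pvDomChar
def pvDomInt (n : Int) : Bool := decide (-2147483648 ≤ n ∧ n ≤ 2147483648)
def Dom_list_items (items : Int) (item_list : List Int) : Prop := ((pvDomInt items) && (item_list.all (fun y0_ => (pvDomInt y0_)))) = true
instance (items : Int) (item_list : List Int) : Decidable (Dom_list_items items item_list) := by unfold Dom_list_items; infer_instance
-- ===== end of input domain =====

-- B replaces A's per-bit-position shift-and-test loop by Kernighan's set-bit enumeration
-- (isolate the lowest set bit, map it to its index via bit_length, clear it) — return value only.

-- ===== PORT A =====
-- A's while-loop; recursion on the shrinking mask (Nat models the mask: exact for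
-- items ≥ 0, which Pre_ guarantees; item_list[index] = pyGet?, none = IndexError,
-- also excluded by Pre_ — there the port keeps the set unchanged, a value never claimed).
def listItemsLoopA (n : Nat) (index : Int) (res : PySem.Set Int) (item_list : List Int) : PySem.Set Int :=
  if n = 0 then res
  else
    listItemsLoopA (n / 2) (index + 1)
      (if n % 2 = 1 then
        match PySem.List.pyGet? item_list index with
        | some v => PySem.Set.add res v
        | none => res
       else res) item_list
decreasing_by exact Nat.div_lt_self (Nat.pos_of_ne_zero (by assumption)) (by omega)

def list_items (items : Int) (item_list : List Int) : List Int :=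
  listItemsLoopA items.toNat 0 PySem.Set.empty item_list

-- ===== PORT B =====
-- B's while-loop; Nat models the mask (exact for items ≥ 0, which Pre_ guarantees):
-- on n ≥ 0 Python's two's-complement 'items & -items' is n ^^^ (n &&& (n - 1)) and
-- 'items &= items - 1' is n &&& (n - 1); low.bit_length() is PySem.Int.bitLength;
-- item_list[...] = pyGet? (none = IndexError, excluded by Pre_; there the set is kept unchanged).
def listItemsLoopB (n : Nat) (res : PySem.Set Int) (item_list : List Int) : PySem.Set Int :=
  if n = 0 then res
  else
    let low : Nat := n ^^^ (n &&& (n - 1))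
    listItemsLoopB (n &&& (n - 1))
      (match PySem.List.pyGet? item_list ((PySem.Int.bitLength (low : Int) - 1 : Nat) : Int) with
       | some v => PySem.Set.add res v
       | none => res) item_list
decreasing_by
  exact Nat.lt_of_le_of_lt (Nat.and_le_right)
    (Nat.sub_lt (Nat.pos_of_ne_zero (by assumption)) Nat.one_pos)

def list_items_alt (items : Int) (item_list : List Int) : List Int :=
  listItemsLoopB items.toNat PySem.Set.empty item_list

-- ===== PRECONDITION & SPEC =====
-- Pre_ excludes items < 0 and masks with a set bit at or beyond the list length:
-- on those inputs A (and B) raises IndexError.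
def Pre_list_items (items : Int) (item_list : List Int) : Prop :=
  0 ≤ items ∧ items < 2 ^ item_list.length
instance (items : Int) (item_list : List Int) : Decidable (Pre_list_items items item_list) := by
  unfold Pre_list_items; infer_instance

def pvWitness_list_items : Int × List Int := (5, [10, 20, 30])

def Spec_list_items (items : Int) (item_list : List Int) (out : List Int) : Prop := out = list_items_alt items item_list
instance (items : Int) (item_list : List Int) (out : List Int) : Decidable (Spec_list_items items item_list out) := by unfold Spec_list_items; infer_instance

-- ===== CLAIM (what is proved, stated in full; the proofs are below) =====
def Claim_equal_list_items : Prop := ∀ (items : Int) (item_list : List Int), Dom_list_items items item_list → Pre_list_items items item_list → Spec_list_items items item_list (list_items items item_list)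

-- ===== LEMMAS AND PROOFS =====

-- Common skeleton: consume the list while halving the mask.
def listItemsC (n : Nat) (l : List Int) (res : PySem.Set Int) : PySem.Set Int :=
  match l with
  | [] => res
  | x :: xs => listItemsC (n / 2) xs (if n % 2 = 1 then PySem.Set.add res x else res)

theorem listItemsC_zero (l : List Int) (res : PySem.Set Int) : listItemsC 0 l res = res := by
  induction l with
  | nil => rfl
  | cons x xs ih => simp [listItemsC, ih]

theorem loopA_eq_C (full : List Int) (n : Nat) (idx : Nat) (res : PySem.Set Int)
    (h : n < 2 ^ (full.length - idx)) :
    listItemsLoopA n (idx : Int) res full = listItemsC n (full.drop idx) res := by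
  induction n using Nat.strong_induction_on generalizing idx res with
  | _ n ih =>
    by_cases hn : n = 0
    · subst hn
      rw [listItemsLoopA, listItemsC_zero]
      simp
    · have hpos : idx < full.length := by
        rcases Nat.lt_or_ge idx full.length with h' | h'
        · exact h'
        · exfalso; rw [Nat.sub_eq_zero_of_le h'] at h; omega
      have hdrop : full.drop idx = full[idx] :: full.drop (idx + 1) :=
        List.drop_eq_getElem_cons hpos
      have hget : PySem.List.pyGet? full (idx : Int) = some full[idx] := by
        simp [PySem.List.pyGet?_natCast, List.getElem?_eq_getElem hpos]
      have hcast : ((idx : Int) + 1) = ((idx + 1 : Nat) : Int) := by push_cast; ring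
      have h2 : n / 2 < 2 ^ (full.length - (idx + 1)) := by
        have hL : full.length - idx = (full.length - (idx + 1)) + 1 := by omega
        rw [hL, pow_succ] at h
        omega
      rw [listItemsLoopA]
      simp only [if_neg hn, hget, hdrop, hcast, listItemsC]
      exact ih (n / 2) (Nat.div_lt_self (Nat.pos_of_ne_zero hn) (by omega)) (idx + 1) _ h2

-- bit facts for one step of Kernighan's loop
theorem and_pred_odd (n : Nat) (h : n % 2 = 1) : n &&& (n - 1) = n - 1 := by
  apply Nat.eq_of_testBit_eq
  intro i
  rw [Nat.testBit_and]
  cases i with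
  | zero => simp [Nat.testBit_zero]; omega
  | succ i =>
    simp only [Nat.testBit_succ]
    have : (n - 1) / 2 = n / 2 := by omega
    rw [this, Bool.and_self]

theorem xor_pred_odd (n : Nat) (h : n % 2 = 1) : n ^^^ (n - 1) = 1 := by
  apply Nat.eq_of_testBit_eq
  intro i
  rw [Nat.testBit_xor]
  cases i with
  | zero => simp [Nat.testBit_zero]; omega
  | succ i =>
    simp only [Nat.testBit_succ]
    have : (n - 1) / 2 = n / 2 := by omega
    rw [this, Bool.xor_self]
    simp

theorem and_pred_even (m : Nat) (hm : 0 < m) : (2 * m) &&& (2 * m - 1) = 2 * (m &&& (m - 1)) := by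
  apply Nat.eq_of_testBit_eq
  intro i
  rw [Nat.testBit_and]
  cases i with
  | zero => simp [Nat.testBit_zero]
  | succ i =>
    simp only [Nat.testBit_succ]
    have h1 : 2 * m / 2 = m := by omega
    have h2 : (2 * m - 1) / 2 = m - 1 := by omega
    have h3 : 2 * (m &&& (m - 1)) / 2 = m &&& (m - 1) := by omega
    rw [h1, h2, h3, Nat.testBit_and]

theorem xor_and_pred_even (m : Nat) (hm : 0 < m) :
    (2 * m) ^^^ ((2 * m) &&& (2 * m - 1)) = 2 * (m ^^^ (m &&& (m - 1))) := by
  rw [and_pred_even m hm]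
  apply Nat.eq_of_testBit_eq
  intro i
  rw [Nat.testBit_xor]
  cases i with
  | zero => simp [Nat.testBit_zero]
  | succ i =>
    simp only [Nat.testBit_succ]
    have h1 : 2 * m / 2 = m := by omega
    have h2 : 2 * (m &&& (m - 1)) / 2 = m &&& (m - 1) := by omega
    have h3 : 2 * (m ^^^ (m &&& (m - 1))) / 2 = m ^^^ (m &&& (m - 1)) := by omega
    rw [h1, h2, h3, Nat.testBit_xor]

theorem stepC (l : List Int) : ∀ (n : Nat) (res : PySem.Set Int), 0 < n → n < 2 ^ l.length →
    listItemsC n l res = listItemsC (n &&& (n - 1)) l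
      (match PySem.List.pyGet? l
          ((PySem.Int.bitLength ((n ^^^ (n &&& (n - 1)) : Nat) : Int) - 1 : Nat) : Int) with
       | some v => PySem.Set.add res v
       | none => res) := by
  induction l with
  | nil => intro n res hn hb; simp at hb; omega
  | cons x xs ih =>
    intro n res hn hb
    rcases Nat.even_or_odd n with ⟨m, hm⟩ | hodd
    · -- n = 2*m even, m > 0
      have hm2 : n = 2 * m := by omega
      subst hm2
      have hmpos : 0 < m := by omega
      have hlow : (2 * m) ^^^ ((2 * m) &&& (2 * m - 1)) = 2 * (m ^^^ (m &&& (m - 1))) := xor_and_pred_even m hmpos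
      have hand : (2 * m) &&& (2 * m - 1) = 2 * (m &&& (m - 1)) := and_pred_even m hmpos
      -- bitLength (2a) = bitLength a + 1 for a > 0
      have hlowpos : 0 < m ^^^ (m &&& (m - 1)) := by
        rcases Nat.eq_zero_or_pos (m ^^^ (m &&& (m - 1))) with h0 | h
        · exfalso
          have := Nat.xor_eq_zero_iff.mp h0
          have hle : m &&& (m - 1) ≤ m - 1 := Nat.and_le_right
          omega
        · exact h
      have hbl : PySem.Int.bitLength ((2 * (m ^^^ (m &&& (m - 1))) : Nat) : Int)
          = PySem.Int.bitLength ((m ^^^ (m &&& (m - 1)) : Nat) : Int) + 1 := by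
        rw [PySem.Int.bitLength_natCast (by omega : 0 < 2 * (m ^^^ (m &&& (m - 1))))]
        congr 2
        omega
      have hblpos : 1 ≤ PySem.Int.bitLength ((m ^^^ (m &&& (m - 1)) : Nat) : Int) := by
        rw [PySem.Int.bitLength_natCast hlowpos]; omega
      -- index on cons is (k_m + 1); pyGet? (x::xs) (k+1) = pyGet? xs k
      rw [hand] at hlow
      have hidx : ((PySem.Int.bitLength ((2 * (m ^^^ (m &&& (m - 1))) : Nat) : Int) - 1 : Nat) : Int)
          = ((PySem.Int.bitLength ((m ^^^ (m &&& (m - 1)) : Nat) : Int) - 1 : Nat) : Int) + 1 := by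
        rw [hbl]; omega
      have hget : ∀ k : Nat, PySem.List.pyGet? (x :: xs) ((k : Int) + 1) = PySem.List.pyGet? xs (k : Int) := by
        intro k
        have : ((k : Int) + 1) = ((k + 1 : Nat) : Int) := by push_cast; ring
        rw [this, PySem.List.pyGet?_natCast, PySem.List.pyGet?_natCast]
        simp
      -- unfold one step of C on the left and right
      show listItemsC (2*m) (x::xs) res = _
      rw [listItemsC, hand]
      rw [listItemsC]
      have e1 : 2 * m / 2 = m := by omega
      have e2 : 2 * m % 2 = 0 := by omega
      have e3 : 2 * (m &&& (m - 1)) / 2 = m &&& (m - 1) := by omega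
      have e4 : 2 * (m &&& (m - 1)) % 2 = 0 := by omega
      rw [e1, e3]
      simp only [e2, e4, if_neg (by omega : ¬ (0 = 1))]
      rw [hlow, hidx, hget]
      exact ih m res hmpos (by simp only [List.length_cons, pow_succ] at hb; omega)
    · -- n odd
      have h1 : n % 2 = 1 := Nat.odd_iff.mp hodd
      have hand : n &&& (n - 1) = n - 1 := and_pred_odd n h1
      rw [listItemsC, hand, listItemsC, xor_pred_odd n h1]
      have hbl1 : PySem.Int.bitLength ((1 : Nat) : Int) = 1 := by decide
      have : ((PySem.Int.bitLength ((1 : Nat) : Int) - 1 : Nat) : Int) = 0 := by rw [hbl1]; simp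
      rw [this]
      have hget0 : PySem.List.pyGet? (x :: xs) (0 : Int) = some x := by
        simp [PySem.List.pyGet?, PySem.List.pyIdx?]
      rw [hget0]
      simp only [if_pos h1, if_neg (by omega : ¬ (n - 1) % 2 = 1)]
      have : (n - 1) / 2 = n / 2 := by omega
      rw [this]

theorem loopB_eq_C (l : List Int) (n : Nat) (res : PySem.Set Int) (h : n < 2 ^ l.length) :
    listItemsLoopB n res l = listItemsC n l res := by
  induction n using Nat.strong_induction_on generalizing res with
  | _ n ih =>
    by_cases hn : n = 0
    · subst hn; rw [listItemsLoopB, listItemsC_zero]; simp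
    · have hlt : n &&& (n - 1) < n :=
        Nat.lt_of_le_of_lt (Nat.and_le_right) (Nat.sub_lt (Nat.pos_of_ne_zero hn) Nat.one_pos)
      rw [listItemsLoopB]
      simp only [if_neg hn]
      rw [ih (n &&& (n - 1)) hlt _ (lt_of_le_of_lt (le_of_lt hlt) h)]
      exact (stepC l n res (Nat.pos_of_ne_zero hn) h).symm

-- ===== VERDICT (by name: the statement is the Claim_ definition above) =====
theorem list_items_spec : Claim_equal_list_items := by
  intro items item_list _ hpre
  unfold Spec_list_items list_items list_items_alt
  have hb : items.toNat < 2 ^ item_list.length := by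
    rcases hpre with ⟨h1, h2⟩
    have : (items.toNat : Int) < 2 ^ item_list.length := by rwa [Int.toNat_of_nonneg h1]
    exact_mod_cast this
  have h0 : (0 : Int) = ((0 : Nat) : Int) := rfl
  rw [h0, loopA_eq_C item_list items.toNat 0 PySem.Set.empty (by simpa using hb),
      loopB_eq_C item_list items.toNat PySem.Set.empty hb]
  simp
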